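-- pv_equiv track=rewrite | github.com/mikkohei13/mocodigi | app/test.py | _generate_spans
-- ===== SOURCE A (Python) =====
-- def normalize_line(line: str) -> str:
--     """Normalize a line for comparison (strip whitespace)."""
--     return line.strip()
--
-- def _generate_spans(lines: list[str], max_span_lines: int) -> list[tuple[int, int, str]]:
--     """
--     Generate consecutive-line spans.
--
--     Returns tuples of (start_idx, end_idx_exclusive, span_text).
--     """
--     spans: list[tuple[int, int, str]] = []
--     n = len(lines)
--     for start in range(n):
--         for length in range(1, max_span_lines + 1):
--             end = start + length
--             if end > n:
--                 break
--             # Join with space so line breaks don't affect matching/tokenization.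
--             span_text = " ".join(normalize_line(l) for l in lines[start:end]).strip()
--             if span_text:
--                 spans.append((start, end, span_text))
--     return spans
-- ===== SOURCE B (Python) =====
-- def _generate_spans(lines: list[str], max_span_lines: int) -> list[tuple[int, int, str]]:
--     """Generate consecutive-line spans via a per-start running accumulator.
--
--     Each line is normalized once up front; every span text is built by
--     extending the previous span's joined text instead of re-slicing and
--     re-normalizing the whole window.
--     """
--     norm = [l.strip() for l in lines]
--     n = len(lines)
--     spans: list[tuple[int, int, str]] = []
--     for start in range(n):
--         stop = min(n, start + max_span_lines)
--         joined = None
--         for end in range(start + 1, stop + 1):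
--             p = norm[end - 1]
--             joined = p if joined is None else joined + " " + p
--             text = joined.strip()
--             if text:
--                 spans.append((start, end, text))
--     return spans
-- ===== Notes on version B (the rewrite author's own statement) =====
-- stated objective: faster
-- what changed: B normalizes every line once up front and, for each start, extends a running joined-text accumulator line by line (with the end bound precomputed via min) instead of re-slicing the window and re-stripping and re-joining all its lines for every (start, length) pair.
import Mathlib
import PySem

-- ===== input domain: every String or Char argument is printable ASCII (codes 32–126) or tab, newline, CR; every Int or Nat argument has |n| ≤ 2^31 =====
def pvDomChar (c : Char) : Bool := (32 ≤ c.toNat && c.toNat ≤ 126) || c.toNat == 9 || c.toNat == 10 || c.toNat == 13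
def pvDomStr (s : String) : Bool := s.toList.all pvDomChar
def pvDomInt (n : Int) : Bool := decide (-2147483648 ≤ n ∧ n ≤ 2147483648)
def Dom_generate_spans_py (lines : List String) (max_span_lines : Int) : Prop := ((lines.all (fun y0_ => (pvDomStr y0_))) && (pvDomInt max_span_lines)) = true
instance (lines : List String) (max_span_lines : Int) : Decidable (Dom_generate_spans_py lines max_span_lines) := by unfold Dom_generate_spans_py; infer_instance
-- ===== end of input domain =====

-- B replaces per-window re-slicing/re-normalizing with one up-front normalization pass and a
-- per-start running joined-text accumulator (objective: faster by a constant factor mechanism;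
-- a timing run decides the label).

-- ===== PORT A =====
def pvNormalizeLine (line : String) : String := PySem.Str.strip line

-- inner 'for length in range(1, max_span_lines+1)' with its break ('if end > n: break'):
-- the lazy range is ported as a counter recursion (length = 1, 2, …, stopping past max_span_lines),
-- exactly the values Python's range yields
def pvAInner (lines : List String) (n start maxlen : Int)
    (spans : List (Int × Int × String)) (length : Int) : List (Int × Int × String) :=
  if maxlen < length then spans
  else
    let e := start + length
    if n < e then spans
    else
      let span_text := PySem.Str.strip (PySem.Str.join " "
        ((PySem.List.slice lines (some start) (some e)).map pvNormalizeLine))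
      let spans' := if span_text = "" then spans else spans ++ [(start, e, span_text)]
      pvAInner lines n start maxlen spans' (length + 1)
termination_by (maxlen + 1 - length).toNat
decreasing_by omega

def generate_spans_py (lines : List String) (max_span_lines : Int) : List (Int × Int × String) :=
  let n : Int := (lines.length : Int)
  (PySem.List.pyRange 0 n 1).foldl
    (fun spans start =>
      pvAInner lines n start max_span_lines spans 1) []

-- ===== PORT B =====
-- inner 'for end in range(start+1, stop+1)' carrying the running joined text; the Python string
-- concatenation 'joined + " " + p' is ported by hand on code points ('t ++ ' ' :: p'), exact.
def pvBInner (norm : List (List Char)) (start : Int) (joined : Option (List Char))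
    (spans : List (Int × Int × String)) : List Int → List (Int × Int × String)
  | [] => spans
  | e :: rest =>
    let p := PySem.List.pyGetD norm (e - 1) []
    let j := match joined with | none => p | some t => t ++ ' ' :: p
    let text := PySem.Chars.strip j
    let spans' := if text = [] then spans else spans ++ [(start, e, String.ofList text)]
    pvBInner norm start (some j) spans' rest

def generate_spans_py_alt (lines : List String) (max_span_lines : Int) : List (Int × Int × String) :=
  let norm := lines.map (fun l => PySem.Chars.strip l.toList)
  let n : Int := (lines.length : Int)
  (PySem.List.pyRange 0 n 1).foldl
    (fun spans start =>
      let stop := min n (start + max_span_lines)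
      pvBInner norm start none spans (PySem.List.pyRange (start + 1) (stop + 1) 1)) []

-- ===== PRECONDITION & SPEC =====
def Spec_generate_spans_py (lines : List String) (max_span_lines : Int) (out : List (Int × Int × String)) : Prop := out = generate_spans_py_alt lines max_span_lines
instance (lines : List String) (max_span_lines : Int) (out : List (Int × Int × String)) : Decidable (Spec_generate_spans_py lines max_span_lines out) := by unfold Spec_generate_spans_py; infer_instance

-- ===== CLAIM (what is proved, stated in full; the proofs are below) =====
def Claim_equal_generate_spans_py : Prop := ∀ (lines : List String) (max_span_lines : Int), Dom_generate_spans_py lines max_span_lines → Spec_generate_spans_py lines max_span_lines (generate_spans_py lines max_span_lines)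

-- ===== LEMMAS AND PROOFS =====

-- proof-side list-based rendering of A's inner loop (over the materialized list of lengths)
def pvAInnerList (lines : List String) (n start : Int)
    (spans : List (Int × Int × String)) : List Int → List (Int × Int × String)
  | [] => spans
  | length :: rest =>
    let e := start + length
    if n < e then spans
    else
      let span_text := PySem.Str.strip (PySem.Str.join " "
        ((PySem.List.slice lines (some start) (some e)).map pvNormalizeLine))
      let spans' := if span_text = "" then spans else spans ++ [(start, e, span_text)]
      pvAInnerList lines n start spans' rest

-- the counter recursion of the port runs exactly over range(length, maxlen+1)
theorem pvAInner_eq_list (lines : List String) (n start maxlen : Int) :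
    ∀ (length : Int) (spans : List (Int × Int × String)),
      pvAInner lines n start maxlen spans length
        = pvAInnerList lines n start spans (PySem.List.pyRange length (maxlen + 1) 1) := by
  suffices H : ∀ (f : Nat) (length : Int) (spans), (maxlen + 1 - length).toNat = f →
      pvAInner lines n start maxlen spans length
        = pvAInnerList lines n start spans (PySem.List.pyRange length (maxlen + 1) 1) by
    intro length spans
    exact H _ length spans rfl
  intro f
  induction f with
  | zero =>
    intro length spans hf
    have hlt : maxlen < length := by omega
    rw [pvAInner, if_pos hlt, PySem.List.pyRange_one_eq_nil (by omega)]
    simp [pvAInnerList]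
  | succ f ih =>
    intro length spans hf
    have hle : ¬ maxlen < length := by omega
    rw [pvAInner, if_neg hle, PySem.List.pyRange_one_cons (by omega : length < maxlen + 1)]
    simp only [pvAInnerList]
    by_cases hbr : n < start + length
    · rw [if_pos hbr, if_pos hbr]
    · rw [if_neg hbr, if_neg hbr]
      exact ih (length + 1) _ (by omega)

-- the window text of lines[s:s+j], normalized per line and joined (before the final strip)
def pvWindow (lines : List String) (s j : Nat) : List (List Char) :=
  ((lines.drop s).take j).map (fun l => PySem.Chars.strip l.toList)

-- B's running accumulator after j inner steps from start s
def pvJoined (lines : List String) (s j : Nat) : Option (List Char) :=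
  if j = 0 then none
  else some (PySem.Chars.join [' '] (pvWindow lines s j))

theorem pv_join_append_singleton (sep p : List Char) :
    ∀ w : List (List Char), w ≠ [] →
      PySem.Chars.join sep (w ++ [p]) = PySem.Chars.join sep w ++ sep ++ p := by
  intro w
  induction w with
  | nil => intro h; exact absurd rfl h
  | cons q ws ih =>
    intro _
    cases ws with
    | nil => simp [PySem.Chars.join_cons_cons, PySem.Chars.join_singleton]
    | cons r rs =>
      have := ih (by simp)
      simp only [List.cons_append, PySem.Chars.join_cons_cons] at *
      rw [this]; simp

-- one break step of A's inner loop returns the accumulator unchanged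
theorem pvAInnerList_break (lines : List String) (n start : Int) (spans)
    (l : Int) (rest : List Int) (h : n < start + l) :
    pvAInnerList lines n start spans (l :: rest) = spans := by
  simp [pvAInnerList, h]

theorem pvAInnerList_append_nobreak (lines : List String) (n start : Int) :
    ∀ (xs ys : List Int) (spans), (∀ l ∈ xs, start + l ≤ n) →
      pvAInnerList lines n start spans (xs ++ ys)
        = pvAInnerList lines n start (pvAInnerList lines n start spans xs) ys := by
  intro xs
  induction xs with
  | nil => intro ys spans _; rfl
  | cons l rest ih =>
    intro ys spans h
    have hl : ¬ n < start + l := by have := h l (by simp); omega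
    simp only [List.cons_append, pvAInnerList, hl]
    exact ih ys _ (fun x hx => h x (by simp [hx]))


theorem pvWindow_succ (lines : List String) (s j : Nat) (h : s + j < lines.length) :
    pvWindow lines s (j + 1)
      = pvWindow lines s j ++ [PySem.Chars.strip (lines[s + j]'h).toList] := by
  unfold pvWindow
  rw [List.take_add_one]
  have hd : (lines.drop s)[j]? = some (lines[s + j]'h) := by
    rw [List.getElem?_drop]
    exact List.getElem?_eq_getElem (by omega)
  simp [hd]

theorem pvJoined_step (lines : List String) (s j : Nat) (h : s + j < lines.length) :
    (match pvJoined lines s j with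
      | none => PySem.Chars.strip (lines[s + j]'h).toList
      | some t => t ++ ' ' :: PySem.Chars.strip (lines[s + j]'h).toList)
      = PySem.Chars.join [' '] (pvWindow lines s (j + 1)) := by
  rw [pvWindow_succ lines s j h]
  unfold pvJoined
  by_cases hj : j = 0
  · subst hj
    simp [pvWindow, PySem.Chars.join_singleton]
  · have hw : pvWindow lines s j ≠ [] := by
      unfold pvWindow
      simp only [ne_eq, List.map_eq_nil_iff, List.take_eq_nil_iff]
      intro hc
      rcases hc with hc | hc
      · exact hj hc
      · rw [List.drop_eq_nil_iff] at hc; omega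
    rw [pv_join_append_singleton _ _ _ hw]
    simp [hj]

-- joint induction: A's truncated inner loop equals B's inner loop
theorem pv_inner_eq (lines : List String) (s : Nat) :
    ∀ (d j : Nat) (spans : List (Int × Int × String)),
      s + j + d ≤ lines.length →
      pvAInnerList lines (lines.length : Int) (s : Int) spans
          (PySem.List.pyRange ((j : Int) + 1) ((j : Int) + (d : Int) + 1) 1)
        = pvBInner (lines.map (fun l => PySem.Chars.strip l.toList)) (s : Int)
            (pvJoined lines s j) spans
            (PySem.List.pyRange ((s : Int) + (j : Int) + 1) ((s : Int) + (j : Int) + (d : Int) + 1) 1) := by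
  intro d
  induction d with
  | zero =>
    intro j spans _
    rw [PySem.List.pyRange_one_eq_nil (by omega), PySem.List.pyRange_one_eq_nil (by omega)]
    simp [pvAInnerList, pvBInner]
  | succ d ih =>
    intro j spans hlen
    have hjlt : s + j < lines.length := by omega
    push_cast
    rw [PySem.List.pyRange_one_cons (by omega : ((j : Int) + 1) < (j : Int) + ((d : Int) + 1) + 1),
        PySem.List.pyRange_one_cons (by omega : ((s : Int) + (j : Int) + 1) < (s : Int) + (j : Int) + ((d : Int) + 1) + 1)]
    -- the slice lines[start:end] is the window of length j+1
    have hslice : PySem.List.slice lines (some (s : Int)) (some ((s : Int) + ((j : Int) + 1)))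
        = (lines.drop s).take (j + 1) := by
      have h := PySem.List.slice_natCast_add lines s (j + 1)
      push_cast at h
      exact h
    -- A's span text as code points
    have htext : PySem.Str.strip (PySem.Str.join " "
          ((PySem.List.slice lines (some (s : Int)) (some ((s : Int) + ((j : Int) + 1)))).map pvNormalizeLine))
        = String.ofList (PySem.Chars.strip (PySem.Chars.join [' '] (pvWindow lines s (j + 1)))) := by
      rw [hslice]
      unfold PySem.Str.strip
      congr 1
      rw [PySem.Str.toList_join, List.map_map]
      have hsep : (" " : String).toList = [' '] := rfl
      rw [hsep]
      congr 1
      unfold pvWindow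
      exact congrArg _ (List.map_congr_left (fun l _ => by
        simp [pvNormalizeLine, Function.comp, PySem.Str.toList_strip]))
    -- B's indexed line is the normalized (s+j)-th line
    have hp : PySem.List.pyGetD (lines.map (fun l => PySem.Chars.strip l.toList)) ((s : Int) + (j : Int) + 1 - 1) []
        = PySem.Chars.strip (lines[s + j]'hjlt).toList := by
      have hc : (s : Int) + (j : Int) + 1 - 1 = ((s + j : Nat) : Int) := by omega
      rw [hc, PySem.List.pyGetD_natCast]
      rw [List.getD_eq_getElem _ _ (by simpa using hjlt)]
      simp
    simp only [pvAInnerList, pvBInner]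
    rw [if_neg (by omega)]
    rw [htext, hp, pvJoined_step lines s j hjlt]
    have harith : (s : Int) + ((j : Int) + 1) = (s : Int) + (j : Int) + 1 := by ring
    rw [harith]
    have hJ : pvJoined lines s (j + 1)
        = some (PySem.Chars.join [' '] (pvWindow lines s (j + 1))) := by
      simp [pvJoined]
    have hIH := ih (j + 1)
    push_cast at hIH
    by_cases hempty : PySem.Chars.strip (PySem.Chars.join [' '] (pvWindow lines s (j + 1))) = ([] : List Char)
    · rw [if_pos (by simp [hempty]), if_pos hempty]
      have h2 := hIH spans (by omega)
      rw [hJ] at h2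
      convert h2 using 3 <;> ring
    · rw [if_neg (by simpa using hempty), if_neg hempty]
      have h2 := hIH (spans ++ [((s : Int), (s : Int) + (j : Int) + 1,
        String.ofList (PySem.Chars.strip (PySem.Chars.join [' '] (pvWindow lines s (j + 1)))))]) (by omega)
      rw [hJ] at h2
      convert h2 using 3 <;> ring

theorem pv_start_eq (lines : List String) (m : Int) (s : Nat) (hs : s < lines.length) (spans) :
    pvAInnerList lines (lines.length : Int) (s : Int) spans (PySem.List.pyRange 1 (m + 1) 1)
      = pvBInner (lines.map (fun l => PySem.Chars.strip l.toList)) (s : Int) none spans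
          (PySem.List.pyRange ((s : Int) + 1) (min (lines.length : Int) ((s : Int) + m) + 1) 1) := by
  by_cases hm : m ≤ 0
  · rw [PySem.List.pyRange_one_eq_nil (by omega),
        PySem.List.pyRange_one_eq_nil (by omega)]
    simp [pvAInnerList, pvBInner]
  · -- effective number of inner iterations
    set k : Nat := min m.toNat (lines.length - s) with hk
    have hks : s + k ≤ lines.length := by omega
    have hkm : (k : Int) ≤ m := by omega
    have hmin : min (lines.length : Int) ((s : Int) + m) = (s : Int) + (k : Int) := by omega
    rw [hmin]
    rw [PySem.List.pyRange_one_append 1 ((k : Int) + 1) (m + 1) (by omega) (by omega)]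
    rw [pvAInnerList_append_nobreak lines (lines.length : Int) (s : Int) _ _ spans (by
      intro l hl
      have := PySem.List.mem_pyRange_one.mp hl
      omega)]
    have htail : ∀ acc, pvAInnerList lines (lines.length : Int) (s : Int) acc
        (PySem.List.pyRange ((k : Int) + 1) (m + 1) 1) = acc := by
      intro acc
      by_cases hy : m ≤ (k : Int)
      · rw [PySem.List.pyRange_one_eq_nil (by omega)]
        simp [pvAInnerList]
      · rw [PySem.List.pyRange_one_cons (by omega)]
        exact pvAInnerList_break _ _ _ _ _ _ (by omega)
    rw [htail]
    have h := pv_inner_eq lines s k 0 spans (by omega)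
    rw [pvJoined] at h
    convert h using 3
    all_goals (push_cast; ring_nf)

-- ===== VERDICT (by name: the statement is the Claim_ definition above) =====
theorem generate_spans_py_spec : Claim_equal_generate_spans_py := by
  intro lines m _
  unfold Spec_generate_spans_py generate_spans_py generate_spans_py_alt
  apply PySem.List.foldl_congr_mem
  intro spans start hstart
  have ⟨h0, h1⟩ := PySem.List.mem_pyRange_one.mp hstart
  obtain ⟨s, rfl⟩ : ∃ s : Nat, start = (s : Int) := ⟨start.toNat, (Int.toNat_of_nonneg h0).symm⟩
  show pvAInner lines (lines.length : Int) (s : Int) m spans 1 = _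
  rw [pvAInner_eq_list lines (lines.length : Int) (s : Int) m 1 spans]
  exact pv_start_eq lines m s (by exact_mod_cast h1) spans
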